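-- pv_equiv track=rewrite | github.com/paulacardozo/MAC2166 | EP2/ep2.py | listaCanonicaDeRaizes
-- ===== SOURCE A (Python) =====
-- def polinomioComRaiz(p,b):
--     """Devolve True se b é raiz do polinômio representado pela lista p,
--        ou False no caso contrário.
--
--        p -- a lista dos coeficientes do polinômio
--        b -- o número a ser testado como raiz
--     """
--
--     # poli é uma "substituição" de um b genérico no polinômio
--
--     poli = 0
--     for i in range (len(p)):
--         poli += p[i]*b**i
--
--
--     if poli == 0:
--         Raiz = True
--     else:
--         Raiz = False
--
--     return Raiz
--
-- def polinomioQuociente(p,b):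
--     """Devolve a lista que representa o polinômio quociente da divisão
--        p(x)/(x-b), onde p(x) é o polinômio cujos coeficientes estão na
--        lista p e b é uma raiz de p(x).
--
--        p -- a lista dos coeficientes do polinômio a ser dividido
--        b -- a raiz a ser usada como divisor
--     """
--
--
--     #aplicando briot-ruffini, a lista começa com o termo que possui maior grau
--     #briot são as "etapas" do briot-ruffini e essas etapas são efetuadas até
--     #o termo independente ser alcançado
--
--
--     quo = [int(p[len(p)-1])]
--
--     i = 2
--     while len(p)-i > 0:
--         briot = quo[len(quo)-1]*b + p[len(p)-i]
--         quo.append(int(briot))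
--         i += 1
--
--     quo.reverse()
--     return quo
--
-- def listaCanonicaDeRaizes(p):
--     """Devolve a lista canônica de raízes inteiras do polinômio
--        representado pela lista p.
--
--        p -- a lista dos coeficientes do polinômios
--     """
--
--
--     #Pelo teorema das raízes racionais, toda raiz inteira de p(x) é um divisor
--     #do termo independente
--     #ou seja, a raiz inteira divide p[0]
--
--
--     div = []
--     raizes = []
--
--     #caso o termo independente seja zero
--
--     while p[0] == 0:
--         raizes.append(0)
--         p = polinomioQuociente(p,p[0])
--
--     #lista de divisores do termo independente
--     i = 1
--     indep = p[0]
--     if indep <0: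
--         indep = -indep
--
--     while indep >= i:
--         d = indep % i
--
--         if d == 0:
--             div.append(-i)
--             div.append(i)
--
--         i += 1
--
--     #verificando se o divisor do termo independente é raiz
--     for divisores in div:
--         r = polinomioComRaiz(p,divisores)
--
--         while polinomioComRaiz(p,divisores) == True:
--             raizes.append(divisores)
--             p = polinomioQuociente(p,divisores)
--
--
--     return raizes
-- ===== SOURCE B (Python) =====
-- def _deflate(coeffs, cand, raizes):
--     """Repeatedly divide coeffs by (x - cand) with one combined Horner pass
--        (evaluation + synthetic division) for as long as cand is a root."""
--     while True:
--         acc = 0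
--         quo = []
--         for c in reversed(coeffs):
--             acc = acc * cand + c
--             quo.append(acc)
--         if acc != 0:
--             return coeffs, raizes
--         raizes.append(cand)
--         quo.pop()
--         coeffs = quo[::-1]
--
--
-- def listaCanonicaDeRaizes(p):
--     # roots at zero = number of leading zero coefficients
--     k = 0
--     while p[k] == 0:
--         k += 1
--     coeffs = p[k:]
--     raizes = [0] * k
--     # positive divisors of |constant term|, ascending, by trial division to sqrt
--     indep = abs(coeffs[0])
--     small = []
--     large = []
--     d = 1
--     while d * d <= indep:
--         if indep % d == 0:
--             small.append(d)
--             q = indep // d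
--             if q != d:
--                 large.append(q)
--         d += 1
--     divisors = small + large[::-1]
--     # test -d, +d in order of growing absolute value, deflating at each root
--     for d in divisors:
--         coeffs, raizes = _deflate(coeffs, -d, raizes)
--         coeffs, raizes = _deflate(coeffs, d, raizes)
--     return raizes
-- ===== Notes on version B (the rewrite author's own statement) =====
-- stated objective: faster
-- what changed: B counts leading zero coefficients directly instead of repeated synthetic divisions by 0, enumerates the divisors of the constant term by trial division up to sqrt(|indep|) instead of scanning 1..|indep|, and tests/deflates each candidate root with a single combined Horner pass (evaluation + quotient) instead of evaluating with b**i powers and then re-running Briot-Ruffini.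
import Mathlib
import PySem

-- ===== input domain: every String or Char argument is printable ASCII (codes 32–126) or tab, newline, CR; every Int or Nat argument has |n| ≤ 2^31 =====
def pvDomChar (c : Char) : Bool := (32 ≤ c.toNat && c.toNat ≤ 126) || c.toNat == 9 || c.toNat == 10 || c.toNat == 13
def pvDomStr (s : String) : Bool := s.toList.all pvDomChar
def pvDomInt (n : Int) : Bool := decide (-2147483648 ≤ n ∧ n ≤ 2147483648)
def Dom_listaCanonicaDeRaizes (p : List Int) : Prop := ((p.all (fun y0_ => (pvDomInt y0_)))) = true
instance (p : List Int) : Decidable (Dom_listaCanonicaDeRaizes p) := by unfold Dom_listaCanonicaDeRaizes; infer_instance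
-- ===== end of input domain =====

-- B finds zero roots by counting leading zero coefficients, enumerates divisors of the
-- constant term by trial division up to its square root, and tests/deflates candidate
-- roots with one combined Horner pass (faster: divisor enumeration drops from O(indep)
-- to O(sqrt indep), evaluation from powers to Horner).


-- ===== PORT A =====
-- poli = sum of p[i]*b**i over i in range(len(p)); return poli == 0
def polinomioComRaiz (p : List Int) (b : Int) : Bool :=
  let poli := (List.range p.length).foldl (fun poli i => poli + p.getD i 0 * b ^ i) 0
  if poli == 0 then true else false

-- Briot-Ruffini: quo = [p[-1]]; while len(p)-i > 0: quo.append(quo[-1]*b + p[len(p)-i]); reverse.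
-- (int(...) is the identity on Int; indices are always in range when p ≠ [], so getD is exact there.)
def polinomioQuociente (p : List Int) (b : Int) : List Int :=
  let quo : List Int := [p.getD (p.length - 1) 0]
  let quo := (List.range (p.length - 2)).foldl
    (fun quo j => quo ++ [quo.getD (quo.length - 1) 0 * b + p.getD (p.length - (j + 2)) 0]) quo
  quo.reverse

-- while p[0] == 0: raizes.append(0); p = polinomioQuociente(p, p[0]).
-- Fuel = len(p): under Pre_ (some coefficient nonzero) each quotient by 0 shortens p by one,
-- so the Python loop makes < len(p) iterations and the fuel is never exhausted.
def stripLoop : Nat → List Int → List Int → List Int × List Int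
  | 0, raizes, p => (raizes, p)
  | fuel+1, raizes, p =>
    if p.getD 0 0 == 0 then
      stripLoop fuel (raizes ++ [0]) (polinomioQuociente p (p.getD 0 0))
    else (raizes, p)

-- while polinomioComRaiz(p, d): raizes.append(d); p = polinomioQuociente(p, d).
-- Fuel = len(p) at entry: on Pre_ inputs p[0] ≠ 0 throughout, each deflation shortens p by one.
def deflLoop : Nat → List Int → Int → List Int → List Int × List Int
  | 0, p, _, raizes => (p, raizes)
  | fuel+1, p, d, raizes =>
    if polinomioComRaiz p d then
      deflLoop fuel (polinomioQuociente p d) d (raizes ++ [d])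
    else (p, raizes)

-- i = 1; while indep >= i: d = indep % i; if d == 0: div.append(-i); div.append(i); i += 1.
-- Fuel = indep.toNat: the loop runs exactly while i ≤ indep, i starting at 1.
def divLoopA : Nat → Int → Int → List Int → List Int
  | 0, _, _, div => div
  | fuel+1, indep, i, div =>
    if indep ≥ i then
      let d := PySem.Int.mod indep i
      divLoopA fuel indep (i+1) (if d == 0 then div ++ [-i, i] else div)
    else div

def listaCanonicaDeRaizes (p : List Int) : List Int :=
  let sr := stripLoop p.length [] p
  let p' := sr.2
  let indep0 := p'.getD 0 0
  let indep := if indep0 < 0 then -indep0 else indep0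
  let div := divLoopA indep.toNat indep 1 []
  -- for divisores in div: while polinomioComRaiz(p, divisores): append and divide
  -- (the Python also computes r = polinomioComRaiz(p, divisores) once per divisor; r is dead code)
  (div.foldl (fun st d => deflLoop st.1.length st.1 d st.2) (p', sr.1)).2

-- ===== PORT B =====
-- k = 0; while p[k] == 0: k += 1   (total recursion; exact whenever some coefficient is nonzero, i.e. on Pre_)
def countLeadZeros : List Int → Nat
  | [] => 0
  | c :: t => if c == 0 then countLeadZeros t + 1 else 0

-- d = 1; while d*d <= indep: if indep % d == 0: small.append(d); q = indep//d; if q != d: large.append(q); d += 1.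
-- Fuel = indep.toNat + 1 bounds the ≤ sqrt(indep) iterations of the Python while loop.
def trialLoop : Nat → Int → Int → List Int → List Int → List Int × List Int
  | 0, _, _, small, large => (small, large)
  | fuel+1, indep, d, small, large =>
    if d * d ≤ indep then
      if PySem.Int.mod indep d == 0 then
        trialLoop fuel indep (d+1) (small ++ [d])
          (if PySem.Int.floordiv indep d != d then large ++ [PySem.Int.floordiv indep d] else large)
      else trialLoop fuel indep (d+1) small large
    else (small, large)

-- acc = 0; quo = []; for c in reversed(coeffs): acc = acc*cand + c; quo.append(acc)
def hornerAccs (coeffs : List Int) (cand : Int) : Int × List Int :=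
  coeffs.reverse.foldl (fun st c => (st.1 * cand + c, st.2 ++ [st.1 * cand + c])) (0, [])

-- _deflate's 'while True' loop; fuel = len(coeffs) at entry bounds the Python iterations on Pre_ inputs
-- (constant term stays nonzero, each deflation shortens coeffs by one).
def deflB : Nat → List Int → Int → List Int → List Int × List Int
  | 0, coeffs, _, raizes => (coeffs, raizes)
  | fuel+1, coeffs, cand, raizes =>
    let hv := hornerAccs coeffs cand
    if hv.1 != 0 then (coeffs, raizes)
    else deflB fuel (hv.2.dropLast.reverse) cand (raizes ++ [cand])

def listaCanonicaDeRaizes_alt (p : List Int) : List Int :=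
  let k := countLeadZeros p
  let coeffs := p.drop k
  let raizes := List.replicate k (0:Int)
  let indep := |coeffs.getD 0 0|
  let sl := trialLoop (indep.toNat + 1) indep 1 [] []
  let divisors := sl.1 ++ sl.2.reverse
  (divisors.foldl (fun st d =>
      let st1 := deflB st.1.length st.1 (-d) st.2
      deflB st1.1.length st1.1 d st1.2) (coeffs, raizes)).2

-- ===== PRECONDITION & SPEC =====
-- Pre_ excludes exactly the inputs on which A never returns: the empty list (IndexError on p[0])
-- and all-zero lists, on which A's stripping loop reaches p = [0] and spins forever.
def Pre_listaCanonicaDeRaizes (p : List Int) : Prop := ∃ c ∈ p, c ≠ 0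
instance (p : List Int) : Decidable (Pre_listaCanonicaDeRaizes p) := by
  unfold Pre_listaCanonicaDeRaizes; infer_instance

def pvWitness_listaCanonicaDeRaizes : List Int := [2, 1]

def Spec_listaCanonicaDeRaizes (p : List Int) (out : List Int) : Prop := out = listaCanonicaDeRaizes_alt p
instance (p : List Int) (out : List Int) : Decidable (Spec_listaCanonicaDeRaizes p out) := by
  unfold Spec_listaCanonicaDeRaizes; infer_instance

-- ===== CLAIM (what is proved, stated in full; the proofs are below) =====
def Claim_equal_listaCanonicaDeRaizes : Prop :=
  ∀ (p : List Int), Dom_listaCanonicaDeRaizes p → Pre_listaCanonicaDeRaizes p →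
    Spec_listaCanonicaDeRaizes p (listaCanonicaDeRaizes p)

-- ===== LEMMAS AND PROOFS =====

-- ---- generic fold shapes ----
-- ---- Horner scan (accs) ----
def accs (b a : Int) : List Int → List Int
  | [] => []
  | c :: t => (a * b + c) :: accs b (a * b + c) t

def hfold (b a : Int) (l : List Int) : Int := l.foldl (fun x c => x * b + c) a

theorem accs_length (b a : Int) (l : List Int) : (accs b a l).length = l.length := by
  induction l generalizing a with
  | nil => rfl
  | cons c t ih => simp [accs, ih]

theorem hornerAccs_eq (p : List Int) (b : Int) :
    hornerAccs p b = (hfold b 0 p.reverse, accs b 0 p.reverse) := by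
  have gen : ∀ (l : List Int) (a : Int) (s : List Int),
      l.foldl (fun st c => (st.1 * b + c, st.2 ++ [st.1 * b + c])) (a, s)
        = (hfold b a l, s ++ accs b a l) := by
    intro l
    induction l with
    | nil => intro a s; simp [hfold, accs]
    | cons c t ih => intro a s; simp [hfold, accs] at ih ⊢; simp [ih]
  simpa [hornerAccs] using gen p.reverse 0 []

theorem getLastD_cons' (x a : Int) (l : List Int) : (x :: l).getLastD a = l.getLastD x := by
  cases l <;> simp [List.getLast?_cons]

theorem revGetD (l : List Int) : l.reverse.getD 0 0 = l.getLastD 0 := by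
  rw [List.getD_eq_getElem?_getD, ← List.head?_eq_getElem?, List.head?_reverse,
    List.getLastD_eq_getLast?]

theorem hfold_eq_getLastD (b a : Int) (l : List Int) : hfold b a l = (accs b a l).getLastD a := by
  induction l generalizing a with
  | nil => rfl
  | cons c t ih =>
    show hfold b (a * b + c) t = _
    rw [accs, getLastD_cons', ih]

theorem accs_append (b a c : Int) (l : List Int) :
    accs b a (l ++ [c]) = accs b a l ++ [(accs b a l).getLastD a * b + c] := by
  induction l generalizing a with
  | nil => simp [accs]
  | cons x t ih =>
    show accs b a (x :: (t ++ [c])) = _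
    rw [accs, accs, ih, getLastD_cons']
    simp

theorem accs_dropLast (b a : Int) (l : List Int) :
    (accs b a l).dropLast = accs b a l.dropLast := by
  induction l generalizing a with
  | nil => rfl
  | cons c t ih =>
    cases t with
    | nil => simp [accs]
    | cons x r => simp [accs] at ih ⊢; simp [ih]

theorem accs_zero (a : Int) (l : List Int) : accs 0 a l = l := by
  induction l generalizing a with
  | nil => rfl
  | cons c t ih => simp [accs, ih]

theorem hfold_shift (b a : Int) (l : List Int) :
    hfold b a l = a * b ^ l.length + hfold b 0 l := by
  induction l generalizing a with
  | nil => simp [hfold]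
  | cons c t ih =>
    simp only [hfold, List.foldl_cons] at ih ⊢
    rw [ih (a * b + c), ih (0 * b + c)]
    simp [pow_succ]; ring

theorem pvFoldlCongr {α β : Type} (l : List α) (f g : β → α → β) (init : β)
    (h : ∀ acc x, x ∈ l → f acc x = g acc x) : l.foldl f init = l.foldl g init := by
  induction l generalizing init with
  | nil => rfl
  | cons x t ih =>
    simp only [List.foldl_cons]
    rw [h init x (by simp)]
    exact ih _ (fun acc y hy => h acc y (by simp [hy]))

theorem rangeSum_eq_hfold (p : List Int) (b : Int) :
    (List.range p.length).foldl (fun s i => s + p.getD i 0 * b ^ i) 0 = hfold b 0 p.reverse := by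
  induction p using List.reverseRecOn with
  | nil => simp [hfold]
  | append_singleton l x ih =>
    have hlen : (l ++ [x]).length = l.length + 1 := by simp
    rw [hlen, List.range_succ, List.foldl_append]
    have hcong : (List.range l.length).foldl (fun s i => s + (l ++ [x]).getD i 0 * b ^ i) 0
        = (List.range l.length).foldl (fun s i => s + l.getD i 0 * b ^ i) 0 := by
      apply pvFoldlCongr
      intro s i hi
      have hi' : i < l.length := List.mem_range.mp hi
      have : (l ++ [x]).getD i 0 = l.getD i 0 := by
        simp [List.getD, List.getElem?_append_left hi']
      rw [this]
    have hx : (l ++ [x]).getD l.length 0 = x := by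
      simp [List.getD]
    simp only [List.foldl_cons, List.foldl_nil, hcong, hx, ih]
    rw [List.reverse_append]
    simp only [List.reverse_cons, List.reverse_nil, List.nil_append, List.singleton_append]
    show _ = hfold b 0 (x :: l.reverse)
    simp only [hfold, List.foldl_cons]
    have := hfold_shift b (0 * b + x) l.reverse
    simp only [hfold] at this ⊢
    rw [this]
    simp; ring

theorem comRaiz_eq (p : List Int) (b : Int) :
    polinomioComRaiz p b = ((hornerAccs p b).1 == 0) := by
  simp only [polinomioComRaiz]
  rw [rangeSum_eq_hfold, hornerAccs_eq]
  by_cases h : hfold b 0 p.reverse = 0 <;> simp [h]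

-- A's quotient fold, characterised via accs
theorem pvAFold {α : Type} (b : Int) (f : α → Int) (cs : List α) : ∀ (q : List Int) (a : Int),
    q.getD (q.length - 1) 0 = a → q ≠ [] →
    cs.foldl (fun quo c => quo ++ [quo.getD (quo.length - 1) 0 * b + f c]) q
      = q ++ accs b a (cs.map f) := by
  induction cs with
  | nil => intro q a _ _; simp [accs]
  | cons c t ih =>
    intro q a hq hne
    simp only [List.foldl_cons, hq, List.map_cons, accs]
    have hlast : (q ++ [a * b + f c]).getD ((q ++ [a * b + f c]).length - 1) 0 = a * b + f c := by
      simp [List.getD]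
    rw [ih (q ++ [a * b + f c]) (a * b + f c) hlast (by simp)]
    simp

theorem pvRangeMap (p : List Int) (h2 : 2 ≤ p.length) :
    (List.range (p.length - 2)).map (fun j => p.getD (p.length - (j + 2)) 0)
      = p.reverse.tail.dropLast := by
  apply List.ext_getElem
  · simp; omega
  · intro i h1 h2'
    have hi : i < p.length - 2 := by simpa using h1
    have hidx : p.length - (i + 2) < p.length := by omega
    simp only [List.getElem_map, List.getElem_range, List.getElem_dropLast, List.getElem_tail,
      List.getElem_reverse]
    rw [List.getD_eq_getElem _ _ hidx]
    congr 1
    simp at h2' ⊢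
    omega

theorem quociente_eq (p : List Int) (b : Int) (h2 : 2 ≤ p.length) :
    polinomioQuociente p b = ((hornerAccs p b).2.dropLast).reverse := by
  have hne : p ≠ [] := by intro h; simp [h] at h2
  have hrne : p.reverse ≠ [] := by simpa
  obtain ⟨hd, tl, hrev⟩ : ∃ hd tl, p.reverse = hd :: tl := by
    cases hr : p.reverse with
    | nil => exact absurd hr hrne
    | cons a l => exact ⟨a, l, rfl⟩
  have hp : p = tl.reverse ++ [hd] := by
    have := congrArg List.reverse hrev
    simpa using this
  have hhd : p.getD (p.length - 1) 0 = hd := by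
    rw [hp]
    simp [List.getD]
  rw [hornerAccs_eq]
  simp only [polinomioQuociente]
  rw [pvAFold b (fun j => p.getD (p.length - (j + 2)) 0) (List.range (p.length - 2))
    [p.getD (p.length - 1) 0] (p.getD (p.length - 1) 0) (by simp) (by simp)]
  rw [pvRangeMap p h2]
  rw [hrev]
  simp only [accs, List.tail_cons]
  have hz : (0 : Int) * b + hd = hd := by ring
  rw [hz, hhd]
  have htne : tl ≠ [] := by
    intro h
    have := congrArg List.length hrev
    simp [h] at this; omega
  have hane : accs b hd tl ≠ [] := by
    intro h
    have := accs_length b hd tl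
    rw [h] at this
    simp at this
    exact htne (List.length_eq_zero_iff.mp this.symm)
  rw [List.dropLast_cons_of_ne_nil hane]
  rw [accs_dropLast]
  simp

-- quotient by 0 is just the tail (used by the stripping loop), for len ≥ 2
theorem quociente_zero (p : List Int) (h2 : 2 ≤ p.length) :
    polinomioQuociente p 0 = p.tail := by
  rw [quociente_eq p 0 h2, hornerAccs_eq]
  simp only [accs_zero]
  rw [List.dropLast_reverse, List.reverse_reverse]

-- ---- the stripping loop ----
theorem strip_eq (p : List Int) : ∀ (r : List Int), (∃ c ∈ p, c ≠ 0) →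
    stripLoop p.length r p = (r ++ List.replicate (countLeadZeros p) 0, p.drop (countLeadZeros p)) := by
  induction p with
  | nil => intro r h; simp at h
  | cons c t ih =>
    intro r h
    by_cases hc : c = 0
    · subst hc
      have hnz : ∃ x ∈ t, x ≠ 0 := by
        rcases h with ⟨x, hx, hne⟩
        rcases List.mem_cons.mp hx with rfl | hmem
        · exact absurd rfl hne
        · exact ⟨x, hmem, hne⟩
      have htne : t ≠ [] := by
        rintro rfl; rcases hnz with ⟨x, hx, _⟩; simp at hx
      have hq : polinomioQuociente (0 :: t) 0 = t := by
        have := quociente_zero (0 :: t) (by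
          cases t with
          | nil => exact absurd rfl htne
          | cons a l => simp)
        simpa using this
      show stripLoop (t.length + 1) r (0 :: t) = _
      rw [stripLoop]
      simp only [List.getD, List.getElem?_cons_zero, Option.getD_some, beq_self_eq_true, if_true]
      rw [hq, ih (r ++ [0]) hnz]
      simp [countLeadZeros, List.replicate_succ]
    · show stripLoop (t.length + 1) r (c :: t) = _
      rw [stripLoop]
      have : ((c :: t).getD 0 0 == 0) = false := by
        simp [List.getD, hc]
      rw [this]
      simp [countLeadZeros, hc]

theorem countLeadZeros_drop (p : List Int) (h : ∃ c ∈ p, c ≠ 0) :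
    p.drop (countLeadZeros p) ≠ [] ∧ (p.drop (countLeadZeros p)).getD 0 0 ≠ 0 := by
  induction p with
  | nil => simp at h
  | cons c t ih =>
    by_cases hc : c = 0
    · subst hc
      have hnz : ∃ x ∈ t, x ≠ 0 := by
        rcases h with ⟨x, hx, hne⟩
        rcases List.mem_cons.mp hx with rfl | hmem
        · exact absurd rfl hne
        · exact ⟨x, hmem, hne⟩
      simpa [countLeadZeros] using ih hnz
    · simp [countLeadZeros, hc, List.getD]

-- ---- deflation loops agree ----
theorem defl_eq (d : Int) (hd : d ≠ 0) : ∀ (fuel : Nat) (p r : List Int),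
    p ≠ [] → p.getD 0 0 ≠ 0 →
    deflLoop fuel p d r = deflB fuel p d r ∧
    (deflB fuel p d r).1 ≠ [] ∧ (deflB fuel p d r).1.getD 0 0 ≠ 0 := by
  intro fuel
  induction fuel with
  | zero => intro p r h1 h2; exact ⟨rfl, h1, h2⟩
  | succ fuel ih =>
    intro p r h1 h2
    simp only [deflLoop, deflB, comRaiz_eq]
    by_cases hv : (hornerAccs p d).1 = 0
    · -- root: p must have length ≥ 2
      have hlen : 2 ≤ p.length := by
        rcases p with _ | ⟨c, t⟩
        · exact absurd rfl h1
        · rcases t with _ | ⟨x, s⟩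
          · exfalso
            have : (hornerAccs [c] d).1 = c := by
              simp [hornerAccs_eq, hfold]
            rw [this] at hv
            simp [List.getD] at h2
            exact h2 hv
          · simp
      have hne : p ≠ [] := h1
      have hrne : p.reverse ≠ [] := by simpa
      have hlast : p.reverse.getLast hrne = p.getD 0 0 := by
        rw [List.getLast_reverse]
        rcases p with _ | ⟨c, t⟩
        · exact absurd rfl h1
        · simp [List.getD]
      have hdecomp : p.reverse = p.reverse.dropLast ++ [p.getD 0 0] := by
        conv_lhs => rw [← List.dropLast_append_getLast hrne]
        rw [hlast]
      set A2 := accs d 0 p.reverse.dropLast with hA2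
      have haccs : accs d 0 p.reverse = A2 ++ [A2.getLastD 0 * d + p.getD 0 0] := by
        conv_lhs => rw [hdecomp]
        rw [accs_append]
      have hvval : (hornerAccs p d).1 = A2.getLastD 0 * d + p.getD 0 0 := by
        rw [hornerAccs_eq]
        simp only [hfold_eq_getLastD, haccs]
        simp
      have hq0 : A2.getLastD 0 ≠ 0 := by
        intro h0
        rw [hvval, h0] at hv
        simp at hv
        exact h2 hv
      have hA2ne : A2 ≠ [] := by
        intro h0
        have := accs_length d 0 p.reverse.dropLast
        rw [hA2] at h0
        rw [h0] at this
        simp at this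
        omega
      have hquo : polinomioQuociente p d = ((hornerAccs p d).2.dropLast).reverse :=
        quociente_eq p d hlen
      have hsnd : (hornerAccs p d).2.dropLast = A2 := by
        rw [hornerAccs_eq]
        simp only [haccs]
        rw [List.dropLast_concat]
      have hnext_ne : A2.reverse ≠ [] := by simpa
      have hnext_hd : A2.reverse.getD 0 0 ≠ 0 := by
        rw [revGetD]
        exact hq0
      rw [if_pos (show ((hornerAccs p d).1 == 0) = true by simp [hv]),
          if_neg (show ¬ ((hornerAccs p d).1 != 0) = true by simp [hv])]
      rw [hquo, hsnd]
      exact ih A2.reverse (r ++ [d]) hnext_ne hnext_hd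
    · rw [if_neg (show ¬ ((hornerAccs p d).1 == 0) = true by simp [hv]),
          if_pos (show ((hornerAccs p d).1 != 0) = true by simp [hv])]
      exact ⟨rfl, h1, h2⟩

-- the main fold: A folds over [-d, d] pairs, B folds divisors with two deflations each
theorem mainFold_eq (L : List Int) : ∀ (st : List Int × List Int),
    st.1 ≠ [] → st.1.getD 0 0 ≠ 0 → (∀ e ∈ L, e ≠ 0) →
    (L.flatMap (fun e => [-e, e])).foldl (fun st d => deflLoop st.1.length st.1 d st.2) st
    = L.foldl (fun st d =>
        let st1 := deflB st.1.length st.1 (-d) st.2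
        deflB st1.1.length st1.1 d st1.2) st := by
  induction L with
  | nil => intro st _ _ _; rfl
  | cons e t ih =>
    intro st h1 h2 hz
    have he : e ≠ 0 := hz e (by simp)
    have hne : -e ≠ 0 := by simpa
    obtain ⟨heq1, hne1, hhd1⟩ := defl_eq (-e) hne st.1.length st.1 st.2 h1 h2
    set st1 := deflB st.1.length st.1 (-e) st.2 with hst1
    obtain ⟨heq2, hne2, hhd2⟩ := defl_eq e he st1.1.length st1.1 st1.2 hne1 hhd1
    simp only [List.flatMap_cons, List.cons_append, List.foldl_cons, List.nil_append]
    rw [heq1, ← hst1, heq2]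
    exact ih _ hne2 hhd2 (fun x hx => hz x (by simp [hx]))

-- ---- divisor enumeration ----
-- reference recursion for B's trial-division loop
def trialRef (N : Int) : Nat → Int → List Int × List Int
  | 0, _ => ([], [])
  | fuel+1, d =>
    if d * d ≤ N then
      if PySem.Int.mod N d == 0 then
        (d :: (trialRef N fuel (d+1)).1,
          if PySem.Int.floordiv N d != d then PySem.Int.floordiv N d :: (trialRef N fuel (d+1)).2
          else (trialRef N fuel (d+1)).2)
      else trialRef N fuel (d+1)
    else ([], [])

theorem trialLoop_eq (N : Int) : ∀ (fuel : Nat) (d : Int) (S L : List Int),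
    trialLoop fuel N d S L = (S ++ (trialRef N fuel d).1, L ++ (trialRef N fuel d).2) := by
  intro fuel
  induction fuel with
  | zero => intro d S L; simp [trialLoop, trialRef]
  | succ fuel ih =>
    intro d S L
    rw [trialLoop, trialRef]
    by_cases h1 : d * d ≤ N
    · simp only [h1, if_true]
      by_cases h2 : PySem.Int.mod N d == 0
      · simp only [h2, if_true]
        rw [ih]
        by_cases h3 : PySem.Int.floordiv N d != d
        · simp [h3]
        · simp only [h3, Bool.false_eq_true, if_false]
          simp [List.append_assoc]
      · simp only [h2, Bool.false_eq_true, if_false]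
        exact ih (d+1) S L
    · simp [h1]

theorem trialRef_S_mem (N : Int) (hN : 1 ≤ N) : ∀ (fuel : Nat) (d : Int), 1 ≤ d →
    N + 1 ≤ d + fuel → ∀ e,
    (e ∈ (trialRef N fuel d).1 ↔ d ≤ e ∧ e * e ≤ N ∧ N % e = 0) := by
  intro fuel
  induction fuel with
  | zero =>
    intro d hd hf e
    simp only [trialRef, List.not_mem_nil, false_iff]
    rintro ⟨h1, h2, _⟩
    have h4 : N + 1 ≤ e := by omega
    have h5 : 0 ≤ (e - 1) * e := mul_nonneg (by omega) (by omega)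
    nlinarith
  | succ fuel ih =>
    intro d hd hf e
    rw [trialRef]
    by_cases h1 : d * d ≤ N
    · rw [if_pos h1]
      by_cases h2 : d ∣ N
      · rw [if_pos (by simpa using (PySem.Int.mod_eq_zero_iff_dvd N d).mpr h2)]
        simp only [List.mem_cons]
        rw [ih (d+1) (by omega) (by omega) e]
        constructor
        · rintro (rfl | ⟨ha, hb, hc⟩)
          · exact ⟨le_refl e, h1, Int.emod_eq_zero_of_dvd h2⟩
          · exact ⟨by omega, hb, hc⟩
        · rintro ⟨ha, hb, hc⟩
          by_cases he : e = d
          · exact Or.inl he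
          · exact Or.inr ⟨by omega, hb, hc⟩
      · rw [if_neg (by simpa using fun h => h2 ((PySem.Int.mod_eq_zero_iff_dvd N d).mp h))]
        rw [ih (d+1) (by omega) (by omega) e]
        constructor
        · rintro ⟨ha, hb, hc⟩
          exact ⟨by omega, hb, hc⟩
        · rintro ⟨ha, hb, hc⟩
          refine ⟨?_, hb, hc⟩
          rcases eq_or_lt_of_le ha with rfl | h
          · exact absurd (Int.dvd_of_emod_eq_zero hc) h2
          · omega
    · rw [if_neg h1]
      simp only [List.not_mem_nil, false_iff]
      rintro ⟨ha, hb, _⟩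
      nlinarith [mul_nonneg (show (0:Int) ≤ e - d by omega) (show (0:Int) ≤ e by nlinarith), mul_nonneg (show (0:Int) ≤ e - d by omega) (show (0:Int) ≤ d by omega)]

theorem trialRef_L_mem (N : Int) (hN : 1 ≤ N) : ∀ (fuel : Nat) (d : Int), 1 ≤ d →
    N + 1 ≤ d + fuel → ∀ e,
    (e ∈ (trialRef N fuel d).2 ↔ ∃ f, d ≤ f ∧ f * f ≤ N ∧ N % f = 0 ∧ e = N / f ∧ e ≠ f) := by
  intro fuel
  induction fuel with
  | zero =>
    intro d hd hf e
    simp only [trialRef, List.not_mem_nil, false_iff]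
    rintro ⟨f, h1, h2, _⟩
    have h4 : N + 1 ≤ f := by omega
    have h5 : 0 ≤ (f - 1) * f := mul_nonneg (by omega) (by omega)
    nlinarith
  | succ fuel ih =>
    intro d hd hf e
    rw [trialRef]
    by_cases h1 : d * d ≤ N
    · rw [if_pos h1]
      have hfd : PySem.Int.floordiv N d = N / d := PySem.Int.floordiv_eq_ediv_of_pos (by omega)
      by_cases h2 : d ∣ N
      · rw [if_pos (by simpa using (PySem.Int.mod_eq_zero_iff_dvd N d).mpr h2)]
        simp only [hfd]
        have hmem : ∀ x, x ∈ (if (N / d != d) = true then N / d :: (trialRef N fuel (d+1)).2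
            else (trialRef N fuel (d+1)).2) ↔
            ((N / d ≠ d ∧ x = N / d) ∨ x ∈ (trialRef N fuel (d+1)).2) := by
          intro x
          by_cases hq : N / d = d
          · simp [hq]
          · rw [if_pos (by simp [hq])]
            simp only [List.mem_cons]
            tauto
        rw [hmem e, ih (d+1) (by omega) (by omega) e]
        constructor
        · rintro (⟨hne, rfl⟩ | ⟨f, ha, hb, hc, hdd, hee⟩)
          · exact ⟨d, le_refl d, h1, Int.emod_eq_zero_of_dvd h2, rfl, hne⟩
          · exact ⟨f, by omega, hb, hc, hdd, hee⟩
        · rintro ⟨f, ha, hb, hc, rfl, hee⟩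
          by_cases hfd' : f = d
          · subst hfd'
            exact Or.inl ⟨hee, rfl⟩
          · exact Or.inr ⟨f, by omega, hb, hc, rfl, hee⟩
      · rw [if_neg (by simpa using fun h => h2 ((PySem.Int.mod_eq_zero_iff_dvd N d).mp h))]
        rw [ih (d+1) (by omega) (by omega) e]
        constructor
        · rintro ⟨f, ha, hb, hc, hdd, hee⟩
          exact ⟨f, by omega, hb, hc, hdd, hee⟩
        · rintro ⟨f, ha, hb, hc, hdd, hee⟩
          refine ⟨f, ?_, hb, hc, hdd, hee⟩
          rcases eq_or_lt_of_le ha with rfl | h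
          · exact absurd (Int.dvd_of_emod_eq_zero hc) h2
          · omega
    · rw [if_neg h1]
      simp only [List.not_mem_nil, false_iff]
      rintro ⟨f, ha, hb, _⟩
      nlinarith [mul_nonneg (show (0:Int) ≤ f - d by omega) (show (0:Int) ≤ f by nlinarith), mul_nonneg (show (0:Int) ≤ f - d by omega) (show (0:Int) ≤ d by omega)]

theorem trialRef_S_sorted (N : Int) (hN : 1 ≤ N) : ∀ (fuel : Nat) (d : Int), 1 ≤ d →
    N + 1 ≤ d + fuel → (trialRef N fuel d).1.Pairwise (· < ·) := by
  intro fuel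
  induction fuel with
  | zero => intro d _ _; simp [trialRef]
  | succ fuel ih =>
    intro d hd hf
    rw [trialRef]
    by_cases h1 : d * d ≤ N
    · rw [if_pos h1]
      have htail := ih (d+1) (by omega) (by omega)
      by_cases h2 : d ∣ N
      · rw [if_pos (by simpa using (PySem.Int.mod_eq_zero_iff_dvd N d).mpr h2)]
        refine List.Pairwise.cons ?_ htail
        intro e he
        have := (trialRef_S_mem N hN fuel (d+1) (by omega) (by omega) e).mp he
        omega
      · rw [if_neg (by simpa using fun h => h2 ((PySem.Int.mod_eq_zero_iff_dvd N d).mp h))]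
        exact htail
    · rw [if_neg h1]; simp

theorem trialRef_L_sorted (N : Int) (hN : 1 ≤ N) : ∀ (fuel : Nat) (d : Int), 1 ≤ d →
    N + 1 ≤ d + fuel → (trialRef N fuel d).2.Pairwise (· > ·) := by
  intro fuel
  induction fuel with
  | zero => intro d _ _; simp [trialRef]
  | succ fuel ih =>
    intro d hd hf
    rw [trialRef]
    by_cases h1 : d * d ≤ N
    · rw [if_pos h1]
      have hfd : PySem.Int.floordiv N d = N / d := PySem.Int.floordiv_eq_ediv_of_pos (by omega)
      have htail := ih (d+1) (by omega) (by omega)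
      by_cases h2 : d ∣ N
      · rw [if_pos (by simpa using (PySem.Int.mod_eq_zero_iff_dvd N d).mpr h2)]
        simp only [hfd]
        by_cases hq : N / d = d
        · simpa [hq] using htail
        · have : (N / d != d) = true := by simp [hq]
          rw [if_pos this]
          refine List.Pairwise.cons ?_ htail
          intro e he
          obtain ⟨f, ha, hb, hc, rfl, hee⟩ :=
            (trialRef_L_mem N hN fuel (d+1) (by omega) (by omega) e).mp he
          have hfdvd : f ∣ N := Int.dvd_of_emod_eq_zero hc
          have h3 : N / f * f = N := Int.ediv_mul_cancel hfdvd
          have h4 : N / d * d = N := Int.ediv_mul_cancel h2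
          have h5 : 1 ≤ N / d := by
            rw [Int.le_ediv_iff_mul_le (by omega : (0:Int) < d)]
            nlinarith
          show N / f < N / d
          by_contra hcon
          push_neg at hcon
          nlinarith
      · rw [if_neg (by simpa using fun h => h2 ((PySem.Int.mod_eq_zero_iff_dvd N d).mp h))]
        exact htail
    · rw [if_neg h1]; simp

-- closed form of L-membership at d = 1
theorem trialRef_L_mem' (N : Int) (hN : 1 ≤ N) (fuel : Nat) (hf : N + 1 ≤ 1 + fuel) (e : Int) :
    e ∈ (trialRef N fuel 1).2 ↔ 1 ≤ e ∧ N < e * e ∧ N % e = 0 := by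
  rw [trialRef_L_mem N hN fuel 1 le_rfl hf e]
  constructor
  · rintro ⟨f, hf1, hff, hfm, rfl, hne⟩
    have hfdvd : f ∣ N := Int.dvd_of_emod_eq_zero hfm
    have h3 : N / f * f = N := Int.ediv_mul_cancel hfdvd
    have hfe : f ≤ N / f := by
      rw [Int.le_ediv_iff_mul_le (by omega : (0:Int) < f)]
      exact hff
    have he1 : 1 ≤ N / f := by
      rw [Int.le_ediv_iff_mul_le (by omega : (0:Int) < f)]
      nlinarith
    have h6 : f + 1 ≤ N / f := by
      rcases eq_or_lt_of_le hfe with h | h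
      · exact absurd h.symm hne
      · omega
    refine ⟨he1, by nlinarith, ?_⟩
    apply Int.emod_eq_zero_of_dvd
    exact ⟨f, h3.symm⟩
  · rintro ⟨he1, hee, hem⟩
    have hedvd : e ∣ N := Int.dvd_of_emod_eq_zero hem
    have h3 : N / e * e = N := Int.ediv_mul_cancel hedvd
    set f := N / e with hfdef
    have hf1 : 1 ≤ f := by
      rw [hfdef, Int.le_ediv_iff_mul_le (by omega : (0:Int) < e)]
      rw [one_mul]
      exact Int.le_of_dvd (by omega) hedvd
    have hfe : f < e := by nlinarith
    refine ⟨f, hf1, by nlinarith, ?_, ?_, by omega⟩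
    · apply Int.emod_eq_zero_of_dvd
      exact ⟨e, h3.symm⟩
    · have hfne : f ≠ 0 := by omega
      rw [← h3, mul_comm]
      exact (Int.mul_ediv_cancel e hfne).symm

def pvDasc (N : Int) : List Int :=
  ((List.range N.toNat).filter (fun j : Nat => PySem.Int.mod N ((j:Int)+1) == 0)).map
    (fun j : Nat => ((j:Int)+1))

theorem pvDasc_mem (N : Int) (hN : 1 ≤ N) (e : Int) :
    e ∈ pvDasc N ↔ 1 ≤ e ∧ e ≤ N ∧ N % e = 0 := by
  simp only [pvDasc, List.mem_map, List.mem_filter, List.mem_range]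
  constructor
  · rintro ⟨j, ⟨hj, hm⟩, rfl⟩
    have hdvd := (PySem.Int.mod_eq_zero_iff_dvd N ((j:Int)+1)).mp (by simpa using hm)
    refine ⟨by omega, by omega, Int.emod_eq_zero_of_dvd hdvd⟩
  · rintro ⟨h1, h2, hm⟩
    refine ⟨(e - 1).toNat, ⟨by omega, ?_⟩, by omega⟩
    have : ((e - 1).toNat : Int) + 1 = e := by omega
    rw [this]
    simpa using (PySem.Int.mod_eq_zero_iff_dvd N e).mpr (Int.dvd_of_emod_eq_zero hm)

theorem pvDasc_sorted (N : Int) : (pvDasc N).Pairwise (· < ·) := by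
  unfold pvDasc
  rw [List.pairwise_map]
  exact List.Pairwise.imp (fun {a b} h => by omega) (List.pairwise_lt_range.filter _)

theorem divLoopA_eq (N : Int) : ∀ (fuel : Nat) (i : Int) (div : List Int), 1 ≤ i →
    i + fuel = N + 1 →
    divLoopA fuel N i div = div ++
      ((((List.range fuel).map (fun j : Nat => i + (j:Int))).filter
        (fun e => PySem.Int.mod N e == 0)).flatMap (fun e => [-e, e])) := by
  intro fuel
  induction fuel with
  | zero => intro i div _ _; simp [divLoopA]
  | succ fuel ih =>
    intro i div hi hsum
    rw [divLoopA]
    rw [if_pos (by push_cast at hsum ⊢; omega)]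
    have hrange : (List.range (fuel+1)).map (fun j : Nat => i + (j:Int))
        = i :: (List.range fuel).map (fun j : Nat => (i+1) + (j:Int)) := by
      rw [List.range_succ_eq_map]
      simp only [List.map_cons, List.map_map]
      refine congrArg₂ _ (by omega) ?_
      apply List.map_congr_left
      intro a _
      simp [Function.comp]
      omega
    have hstep : ∀ div', divLoopA fuel N (i+1) div' = div' ++
        ((((List.range fuel).map (fun j : Nat => (i+1) + (j:Int))).filter
          (fun e => PySem.Int.mod N e == 0)).flatMap (fun e => [-e, e])) := by
      intro div'
      exact ih (i+1) div' (by omega) (by push_cast at hsum ⊢; omega)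
    rw [hrange, List.filter_cons]
    by_cases hm : PySem.Int.mod N i == 0
    · simp only [hm, if_true, List.flatMap_cons]
      rw [hstep]
      simp [List.append_assoc]
    · simp only [hm, Bool.false_eq_true, if_false]
      rw [hstep]

theorem pvSortedExt : ∀ (l1 l2 : List Int), l1.Pairwise (· < ·) → l2.Pairwise (· < ·) →
    (∀ e, e ∈ l1 ↔ e ∈ l2) → l1 = l2 := by
  intro l1
  induction l1 with
  | nil =>
    intro l2 _ _ hm
    cases l2 with
    | nil => rfl
    | cons b t => exact absurd ((hm b).mpr (by simp)) (by simp)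
  | cons a t ih =>
    intro l2 h1 h2 hm
    cases l2 with
    | nil => exact absurd ((hm a).mp (by simp)) (by simp)
    | cons b t2 =>
      have hab : a = b := by
        have ha := (hm a).mp (by simp)
        have hb := (hm b).mpr (by simp)
        rcases List.mem_cons.mp ha with h | h
        · exact h
        · rcases List.mem_cons.mp hb with h' | h'
          · exact h'.symm
          · have hx := (List.pairwise_cons.mp h2).1 a h
            have hy := (List.pairwise_cons.mp h1).1 b h'
            omega
      subst hab
      have ht : ∀ e, e ∈ t ↔ e ∈ t2 := by
        intro e
        constructor
        · intro he
          have hlt := (List.pairwise_cons.mp h1).1 e he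
          rcases List.mem_cons.mp ((hm e).mp (by simp [he])) with h | h
          · omega
          · exact h
        · intro he
          have hlt := (List.pairwise_cons.mp h2).1 e he
          rcases List.mem_cons.mp ((hm e).mpr (by simp [he])) with h | h
          · omega
          · exact h
      rw [ih t2 (List.pairwise_cons.mp h1).2 (List.pairwise_cons.mp h2).2 ht]

theorem divisors_eq (N : Int) (hN : 1 ≤ N) :
    (trialLoop (N.toNat + 1) N 1 [] []).1 ++ (trialLoop (N.toNat + 1) N 1 [] []).2.reverse
      = pvDasc N := by
  rw [trialLoop_eq]
  simp only [List.nil_append]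
  have hf : N + 1 ≤ 1 + ((N.toNat + 1 : Nat) : Int) := by omega
  have hS := trialRef_S_mem N hN (N.toNat+1) 1 le_rfl hf
  have hL := trialRef_L_mem' N hN (N.toNat+1) hf
  have hSs := trialRef_S_sorted N hN (N.toNat+1) 1 le_rfl hf
  have hLs := trialRef_L_sorted N hN (N.toNat+1) 1 le_rfl hf
  set S := (trialRef N (N.toNat+1) 1).1
  set L := (trialRef N (N.toNat+1) 1).2
  have hsortD : (S ++ L.reverse).Pairwise (· < ·) := by
    rw [List.pairwise_append]
    refine ⟨hSs, List.pairwise_reverse.mpr hLs, ?_⟩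
    intro a ha b hb
    rw [List.mem_reverse] at hb
    obtain ⟨ha1, ha2, _⟩ := (hS a).mp ha
    obtain ⟨hb1, hb2, _⟩ := (hL b).mp hb
    nlinarith
  apply pvSortedExt _ _ hsortD (pvDasc_sorted N)
  intro e
  rw [List.mem_append, List.mem_reverse, hS e, hL e, pvDasc_mem N hN e]
  constructor
  · rintro (⟨h1, h2, h3⟩ | ⟨h1, h2, h3⟩) <;>
      exact ⟨h1, Int.le_of_dvd (by omega) (Int.dvd_of_emod_eq_zero h3), h3⟩
  · rintro ⟨h1, h2, h3⟩
    by_cases h : e * e ≤ N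
    · exact Or.inl ⟨h1, h, h3⟩
    · exact Or.inr ⟨h1, by omega, h3⟩

-- ---- assembly ----
theorem listaCanonicaDeRaizes_spec' (p : List Int) (hpre : Pre_listaCanonicaDeRaizes p) :
    listaCanonicaDeRaizes p = listaCanonicaDeRaizes_alt p := by
  obtain ⟨hne, hhd⟩ := countLeadZeros_drop p hpre
  simp only [listaCanonicaDeRaizes, listaCanonicaDeRaizes_alt]
  rw [strip_eq p [] hpre]
  simp only [List.nil_append]
  set k := countLeadZeros p with hk
  set coeffs := p.drop k with hcdef
  set x := coeffs.getD 0 0 with hx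
  have habs : (if x < 0 then -x else x) = |x| := by
    rcases lt_or_ge x 0 with h | h
    · simp [h, abs_of_neg h]
    · simp [not_lt.mpr h, abs_of_nonneg h]
  rw [habs]
  set N := |x| with hNdef
  have hN : 1 ≤ N := by
    have h1 : x ≠ 0 := hhd
    have h2 : 0 < |x| := abs_pos.mpr h1
    omega
  have hdiva : divLoopA N.toNat N 1 [] = (pvDasc N).flatMap (fun e => [-e, e]) := by
    rw [divLoopA_eq N N.toNat 1 [] le_rfl (by omega)]
    rw [List.nil_append]
    congr 1
    have hmap : (List.range N.toNat).map (fun j : Nat => (1:Int) + (j:Int))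
        = (List.range N.toNat).map (fun j : Nat => ((j:Int) + 1)) := by
      apply List.map_congr_left
      intro a _
      omega
    rw [hmap, pvDasc]
    rw [List.filter_map]
    congr 1
  rw [hdiva]
  have hz : ∀ e ∈ pvDasc N, e ≠ 0 := by
    intro e he
    have := (pvDasc_mem N hN e).mp he
    omega
  rw [mainFold_eq (pvDasc N) (coeffs, List.replicate k 0) hne hhd hz]
  rw [divisors_eq N hN]

-- ===== VERDICT (by name: the statement is the Claim_ definition above) =====
theorem listaCanonicaDeRaizes_spec : Claim_equal_listaCanonicaDeRaizes := by
  intro p _ hpre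
  unfold Spec_listaCanonicaDeRaizes
  exact listaCanonicaDeRaizes_spec' p hpre
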